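-- pv_equiv track=rewrite | github.com/DGomez1122/Portafolio2 | Invertir Lista.py | AuxInvertir
-- ===== SOURCE A (Python) =====
-- def AuxInvertir(lista,res):
--     if lista==[]:
--         return res
--     else:
--         if(lista[-1],int) and (lista[-1]>=0):
--             return AuxInvertir(lista[:-1],res+[lista[-1]])
--         else:
--             return AuxInvertir(lista[:-1],res)
-- ===== SOURCE B (Python) =====
-- def AuxInvertir(lista, res):
--     # Iterative accumulator loop: walk the indices from the end to the front,
--     # appending each non-negative element; res itself is never mutated.
--     result = res
--     for i in range(len(lista) - 1, -1, -1):
--         if lista[i] >= 0: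
--             result = result + [lista[i]]
--     return result
-- ===== Notes on version B (the rewrite author's own statement) =====
-- stated objective: faster
-- what changed: Replaces A's tail recursion, which copies lista[:-1] by slicing at every step, with a single explicit index loop from the last element down to the first keeping an accumulator; no slicing and no recursion.
import Mathlib
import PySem

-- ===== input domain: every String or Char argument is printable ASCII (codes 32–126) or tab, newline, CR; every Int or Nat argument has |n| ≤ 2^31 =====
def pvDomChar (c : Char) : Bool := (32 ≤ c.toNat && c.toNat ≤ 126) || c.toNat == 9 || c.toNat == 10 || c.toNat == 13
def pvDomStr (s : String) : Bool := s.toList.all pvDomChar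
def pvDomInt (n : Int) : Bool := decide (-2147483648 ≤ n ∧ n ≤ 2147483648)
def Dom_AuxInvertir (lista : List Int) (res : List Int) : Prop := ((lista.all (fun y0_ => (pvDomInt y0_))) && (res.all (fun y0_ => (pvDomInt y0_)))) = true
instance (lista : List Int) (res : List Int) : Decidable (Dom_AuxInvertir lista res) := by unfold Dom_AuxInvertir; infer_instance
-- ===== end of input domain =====

-- B is faster: it replaces A's tail recursion over per-step list slices with one explicit index loop (last element down to the first) accumulating the non-negative elements.


-- ===== PORT A =====
-- 'if (lista[-1], int) and (lista[-1] >= 0)': the tuple is always truthy, so the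
-- condition reduces to lista[-1] >= 0 (transliterated as such, with a comment that
-- this is exactly Python's truthiness of a non-empty tuple).
def AuxInvertir (lista : List Int) (res : List Int) : List Int :=
  if lista = [] then res
  else
    if PySem.List.pyGetD lista (-1) 0 ≥ 0 then
      AuxInvertir (PySem.List.slice lista none (some (-1))) (res ++ [PySem.List.pyGetD lista (-1) 0])
    else
      AuxInvertir (PySem.List.slice lista none (some (-1))) res
  termination_by lista.length
  decreasing_by
    all_goals
      simp only [PySem.List.slice_to_neg_one, List.length_dropLast]
      rcases lista with _ | ⟨a, t⟩
      · simp_all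
      · simp only [List.length_cons]; omega

-- ===== PORT B =====
def AuxInvertir_alt (lista : List Int) (res : List Int) : List Int :=
  (PySem.List.pyRange ((lista.length : Int) - 1) (-1) (-1)).foldl
    (fun result i =>
      if PySem.List.pyGetD lista i 0 ≥ 0 then result ++ [PySem.List.pyGetD lista i 0]
      else result) res

-- ===== PRECONDITION & SPEC =====
def Spec_AuxInvertir (lista : List Int) (res : List Int) (out : List Int) : Prop := out = AuxInvertir_alt lista res
instance (lista : List Int) (res : List Int) (out : List Int) : Decidable (Spec_AuxInvertir lista res out) := by unfold Spec_AuxInvertir; infer_instance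

-- ===== CLAIM (what is proved, stated in full; the proofs are below) =====
def Claim_equal_AuxInvertir : Prop := ∀ (lista : List Int) (res : List Int), Dom_AuxInvertir lista res → Spec_AuxInvertir lista res (AuxInvertir lista res)

-- ===== LEMMAS AND PROOFS =====

-- Characterisation of A: res followed by the reversed list of non-negative elements.
theorem auxA_eq (lista res : List Int) :
    AuxInvertir lista res = res ++ (lista.reverse.filter (fun x => 0 ≤ x)) := by
  induction lista using List.reverseRecOn generalizing res with
  | nil => simp [AuxInvertir]
  | append_singleton xs x ih =>
    rw [AuxInvertir, if_neg (by simp : ¬ (xs ++ [x] = []))]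
    simp only [PySem.List.pyGetD_neg_one_append_singleton, PySem.List.slice_to_neg_one,
      List.dropLast_concat, List.reverse_append, List.reverse_cons, List.reverse_nil,
      List.nil_append, List.singleton_append, List.filter_cons]
    by_cases hx : 0 ≤ x
    · simp [ge_iff_le, hx, ih]
    · simp [ge_iff_le, hx, ih]

-- Characterisation of B: the countdown index loop produces the same value.
theorem auxB_eq (lista res : List Int) :
    AuxInvertir_alt lista res = res ++ (lista.reverse.filter (fun x => 0 ≤ x)) := by
  unfold AuxInvertir_alt
  induction lista using List.reverseRecOn generalizing res with
  | nil => simp [PySem.List.pyRange_neg_one_eq_nil]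
  | append_singleton xs x ih =>
    have hlen : ((xs ++ [x]).length : Int) - 1 = (xs.length : Int) := by simp
    rw [hlen, PySem.List.pyRange_neg_one_cons (by omega : (-1 : Int) < (xs.length : Int)),
      List.foldl_cons]
    have hx : PySem.List.pyGetD (xs ++ [x]) (xs.length : Int) 0 = x := by
      rw [PySem.List.pyGetD_eq_getElem _ _ (by omega) (by simp)]
      simp
    have hcongr : ∀ (r : List Int),
        (PySem.List.pyRange ((xs.length : Int) - 1) (-1) (-1)).foldl
          (fun result i =>
            if PySem.List.pyGetD (xs ++ [x]) i 0 ≥ 0 then result ++ [PySem.List.pyGetD (xs ++ [x]) i 0]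
            else result) r
        = (PySem.List.pyRange ((xs.length : Int) - 1) (-1) (-1)).foldl
          (fun result i =>
            if PySem.List.pyGetD xs i 0 ≥ 0 then result ++ [PySem.List.pyGetD xs i 0]
            else result) r := by
      intro r
      apply PySem.List.foldl_congr_mem
      intro acc i hi
      have hi' := (PySem.List.mem_pyRange_neg_one).1 hi
      have hget : PySem.List.pyGetD (xs ++ [x]) i 0 = PySem.List.pyGetD xs i 0 := by
        rw [PySem.List.pyGetD_eq_getElem (xs ++ [x]) _ (by omega) (by simp; omega),
            PySem.List.pyGetD_eq_getElem xs _ (by omega) (by omega)]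
        rw [List.getElem_append_left (by omega)]
      rw [hget]
    rw [hx, hcongr, List.reverse_append]
    by_cases hxx : 0 ≤ x
    · simp only [ge_iff_le, hxx, if_true]
      rw [ih (res ++ [x])]
      simp [hxx]
    · simp only [ge_iff_le, hxx, if_false]
      rw [ih res]
      simp [hxx]

-- ===== VERDICT (by name: the statement is the Claim_ definition above) =====
theorem AuxInvertir_spec : Claim_equal_AuxInvertir := by
  intro lista res _
  unfold Spec_AuxInvertir
  rw [auxA_eq, auxB_eq]
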